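-- pv_equiv track=rewrite | github.com/hasanalpdoyduk/CS104 | CS104/CS104_Hw5_Answ1my.py | func3
-- ===== SOURCE A (Python) =====
-- A = [2, 3, 4, 5, 6, 7, 8]
--
-- B = [7, 8, 9, 10]
--
-- def func3(x):
--     n = ""
--     e = 0
--     f = 0
--     for i in A:
--         if i == x:
--             n += "1"
--         else:
--            n += "0"
--     for i in B:
--         if i == x:
--             n += "2"
--         else:
--             n += "3"
--     for i in n:
--         if i == "1":
--             e += 1
--     for i in n:
--         if i == "2":
--             f += 2
--     if e == 1 and f != 2:
--         return True
-- ===== SOURCE B (Python) =====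
-- A = [2, 3, 4, 5, 6, 7, 8]
--
-- B = [7, 8, 9, 10]
--
-- def func3(x):
--     if x in A and x not in B:
--         return True
-- ===== Notes on version B (the rewrite author's own statement) =====
-- stated objective: simpler
-- what changed: Replaced the four-loop string-encoding-and-rescanning decomposition with two direct membership tests (x in A and x not in B), preserving the implicit None on the failing branch.
import Mathlib
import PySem

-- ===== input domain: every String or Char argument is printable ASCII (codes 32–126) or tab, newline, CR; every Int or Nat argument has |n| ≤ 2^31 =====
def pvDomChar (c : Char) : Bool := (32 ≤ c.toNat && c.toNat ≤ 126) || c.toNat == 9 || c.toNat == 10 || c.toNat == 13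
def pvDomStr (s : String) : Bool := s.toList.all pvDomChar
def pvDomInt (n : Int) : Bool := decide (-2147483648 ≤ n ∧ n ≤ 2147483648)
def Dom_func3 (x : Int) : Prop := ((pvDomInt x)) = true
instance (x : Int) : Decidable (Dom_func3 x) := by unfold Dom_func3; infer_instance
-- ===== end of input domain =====

-- B replaces A's string-encoding-and-rescanning with two direct membership tests (simpler).

-- ===== PORT A =====
def pvA : List Int := [2, 3, 4, 5, 6, 7, 8]
def pvB : List Int := [7, 8, 9, 10]

def func3 (x : Int) : Option Bool :=
  let n : String := pvA.foldl (fun s i => s ++ (if i == x then "1" else "0")) ""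
  let n : String := pvB.foldl (fun s i => s ++ (if i == x then "2" else "3")) n
  let e : Int := n.toList.foldl (fun e c => if c == '1' then e + 1 else e) 0
  let f : Int := n.toList.foldl (fun f c => if c == '2' then f + 2 else f) 0
  if e == 1 && f != 2 then some true else none

-- ===== PORT B =====
def func3_alt (x : Int) : Option Bool :=
  if pvA.contains x && !(pvB.contains x) then some true else none

-- ===== PRECONDITION & SPEC =====
def Spec_func3 (x : Int) (out : Option Bool) : Prop := out = func3_alt x
instance (x : Int) (out : Option Bool) : Decidable (Spec_func3 x out) := by unfold Spec_func3; infer_instance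

-- ===== CLAIM (what is proved, stated in full; the proofs are below) =====
def Claim_equal_func3 : Prop := ∀ (x : Int), Dom_func3 x → Spec_func3 x (func3 x)

-- ===== LEMMAS AND PROOFS =====

-- ===== VERDICT (by name: the statement is the Claim_ definition above) =====
theorem func3_spec : Claim_equal_func3 := by
  intro x _
  unfold Spec_func3 func3 func3_alt pvA pvB
  by_cases h2 : x = 2 <;> by_cases h3 : x = 3 <;> by_cases h4 : x = 4 <;>
    by_cases h5 : x = 5 <;> by_cases h6 : x = 6 <;> by_cases h7 : x = 7 <;>
    by_cases h8 : x = 8 <;> by_cases h9 : x = 9 <;> by_cases h10 : x = 10 <;>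
    first
      | omega
      | (subst_vars; decide)
      | simp [List.foldl,
          (show ¬(2:Int) = x by omega), (show ¬(3:Int) = x by omega),
          (show ¬(4:Int) = x by omega), (show ¬(5:Int) = x by omega),
          (show ¬(6:Int) = x by omega), (show ¬(7:Int) = x by omega),
          (show ¬(8:Int) = x by omega), (show ¬(9:Int) = x by omega),
          (show ¬(10:Int) = x by omega), h2, h3, h4, h5, h6, h7, h8, h9, h10]
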